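-- pv_equiv track=rewrite | github.com/munio-dev/munio | src/munio/scan/layers/_z3_utils.py | _has_end_anchor
-- ===== SOURCE A (Python) =====
-- def _has_end_anchor(pattern: str) -> bool:
--     """Check if pattern ends with an unescaped ``$`` anchor.
--
--     Counts consecutive backslashes before the ``$``.  Even count means
--     the ``$`` is unescaped (is an anchor); odd count means the ``$``
--     itself is escaped (literal dollar sign).
--     """
--     if not pattern.endswith("$"):
--         return False
--     bs_count = 0
--     for ch in reversed(pattern[:-1]):
--         if ch == "\\":
--             bs_count += 1
--         else:
--             break
--     return bs_count % 2 == 0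
-- ===== SOURCE B (Python) =====
-- def _has_end_anchor(pattern: str) -> bool:
--     # Forward single-pass two-state automaton: `even` tracks whether the
--     # backslash run currently ending at the scan position has even length
--     # (a non-backslash resets it).  A final unescaped '$' needs even=True
--     # just before the last character.
--     if not pattern or pattern[-1] != "$":
--         return False
--     even = True
--     for ch in pattern[:-1]:
--         even = not even if ch == "\\" else True
--     return even
-- ===== Notes on version B (the rewrite author's own statement) =====
-- stated objective: alternative
-- what changed: Replaces A's backward scan (iterate reversed body, count trailing backslashes with break, then test parity) by a forward single-pass two-state parity automaton over the body: a boolean tracking whether the current backslash run has even length, reset by any non-backslash.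
import Mathlib
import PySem

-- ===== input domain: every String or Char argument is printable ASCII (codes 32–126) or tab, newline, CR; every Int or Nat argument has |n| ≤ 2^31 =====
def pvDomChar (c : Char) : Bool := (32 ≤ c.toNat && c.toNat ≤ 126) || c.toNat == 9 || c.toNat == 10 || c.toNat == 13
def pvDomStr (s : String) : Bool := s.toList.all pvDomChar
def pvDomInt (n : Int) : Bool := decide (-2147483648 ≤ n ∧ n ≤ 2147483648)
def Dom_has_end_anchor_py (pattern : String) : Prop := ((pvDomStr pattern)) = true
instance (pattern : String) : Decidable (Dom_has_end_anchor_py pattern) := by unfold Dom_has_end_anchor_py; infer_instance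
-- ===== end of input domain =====

-- B replaces A's reversed backslash-counting loop (with break) by a forward single-pass
-- two-state parity automaton over the body; same values everywhere.

-- ===== PORT A =====
-- the for-loop over reversed(pattern[:-1]) with break: recursion that stops at the first non-backslash
def pvCountLoop : List Char → Nat
  | [] => 0
  | c :: rest => if c == '\\' then 1 + pvCountLoop rest else 0

def has_end_anchor_py (pattern : String) : Bool :=
  let cs := pattern.toList
  if !PySem.Chars.endswith cs ['$'] then false
  else
    let bs_count := pvCountLoop (PySem.Chars.slice cs none (some (-1))).reverse
    bs_count % 2 == 0

-- ===== PORT B =====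
-- forward loop over pattern[:-1]: `even` = current trailing backslash run has even length
def has_end_anchor_py_alt (pattern : String) : Bool :=
  let cs := pattern.toList
  if cs.isEmpty || !(PySem.List.pyGet? cs (-1) == some '$') then false
  else
    (PySem.Chars.slice cs none (some (-1))).foldl
      (fun even c => if c == '\\' then !even else true) true

-- ===== PRECONDITION & SPEC =====
def Spec_has_end_anchor_py (pattern : String) (out : Bool) : Prop := out = has_end_anchor_py_alt pattern
instance (pattern : String) (out : Bool) : Decidable (Spec_has_end_anchor_py pattern out) := by unfold Spec_has_end_anchor_py; infer_instance

-- ===== CLAIM =====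
def Claim_equal_has_end_anchor_py : Prop := ∀ (pattern : String), Dom_has_end_anchor_py pattern → Spec_has_end_anchor_py pattern (has_end_anchor_py pattern)

-- ===== LEMMAS AND PROOFS =====
theorem pvFold_eq_parity (l : List Char) :
    l.foldl (fun even c => if c == '\\' then !even else true) true
      = (pvCountLoop l.reverse % 2 == 0) := by
  induction l using List.reverseRecOn with
  | nil => simp [pvCountLoop]
  | append_singleton l c ih =>
    rw [List.foldl_append]
    simp only [List.foldl_cons, List.foldl_nil, List.reverse_append, List.reverse_cons,
      List.reverse_nil, List.nil_append, List.cons_append]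
    simp only [pvCountLoop]
    by_cases hc : c == '\\'
    · simp only [hc, if_true, ih]
      rcases Nat.mod_two_eq_zero_or_one (pvCountLoop l.reverse) with h | h
      · have h1 : (1 + pvCountLoop l.reverse) % 2 = 1 := by omega
        simp [h, h1]
      · have h1 : (1 + pvCountLoop l.reverse) % 2 = 0 := by omega
        simp [h, h1]
    · simp [hc]

theorem pvGuards_eq (cs : List Char) :
    (!PySem.Chars.endswith cs ['$'])
      = (cs.isEmpty || !(PySem.List.pyGet? cs (-1) == some '$')) := by
  induction cs using List.reverseRecOn with
  | nil => decide
  | append_singleton l c _ =>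
    have hsuf : ['$'] <:+ (l ++ [c]) ↔ c = '$' := by
      constructor
      · rintro ⟨t, ht⟩
        have := congrArg (·.getLast?) ht
        simp at this
        exact this.symm
      · rintro rfl; exact ⟨l, rfl⟩
    have hend : PySem.Chars.endswith (l ++ [c]) ['$'] = decide (c = '$') := by
      by_cases hc : c = '$'
      · subst hc
        simp only [decide_true]
        exact (PySem.Chars.endswith_iff (l ++ ['$']) ['$']).2 ⟨l, rfl⟩
      · simp only [hc, decide_false]
        cases hB : PySem.Chars.endswith (l ++ [c]) ['$']
        · rfl
        · exact absurd (hsuf.1 ((PySem.Chars.endswith_iff (l ++ [c]) ['$']).1 hB)) hc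
    simp only [PySem.List.pyGet?_neg_one_append_singleton, hend]
    by_cases h : c = '$' <;> simp [h]

-- ===== VERDICT =====
theorem has_end_anchor_py_spec : Claim_equal_has_end_anchor_py := by
  intro pattern _
  unfold Spec_has_end_anchor_py has_end_anchor_py has_end_anchor_py_alt
  simp only []
  rw [pvGuards_eq]
  by_cases h : (pattern.toList.isEmpty || !(PySem.List.pyGet? pattern.toList (-1) == some '$')) <;>
    simp only [h, if_true]
  rw [pvFold_eq_parity]
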